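-- pv_equiv track=rewrite | github.com/pideviq/quizzes | Python/fb_hc_2013_beautiful_strings.py | beauty
-- ===== SOURCE A (Python) =====
-- from string import ascii_lowercase
--
-- def beauty(string):
--     '''
--     Define the beauty of the given string
--     '''
--     string = string.lower()
--     quant = {letter: 0 for letter in ascii_lowercase}
--
--     for char in string:
--         if char in quant:
--             quant[char] += 1
--
--     value = sorted(quant, key=lambda i: quant[i])
--     return sum(value.index(char) + 1 for char in string if char in quant)
-- ===== SOURCE B (Python) =====
-- from string import ascii_lowercase
--
-- def beauty(string):
--     '''
--     Define the beauty of the given string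
--     '''
--     s = string.lower()
--     quant = {letter: sum(1 for c in s if c == letter) for letter in ascii_lowercase}
--     value = sorted(quant, key=lambda i: quant[i])
--     return sum(quant[letter] * (i + 1) for i, letter in enumerate(value))
-- ===== Notes on version B (the rewrite author's own statement) =====
-- stated objective: simpler
-- what changed: B drops A's second per-character pass with list.index: it computes per-letter counts directly and sums count*(rank+1) over the 26 sorted letters via enumerate.
import Mathlib
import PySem

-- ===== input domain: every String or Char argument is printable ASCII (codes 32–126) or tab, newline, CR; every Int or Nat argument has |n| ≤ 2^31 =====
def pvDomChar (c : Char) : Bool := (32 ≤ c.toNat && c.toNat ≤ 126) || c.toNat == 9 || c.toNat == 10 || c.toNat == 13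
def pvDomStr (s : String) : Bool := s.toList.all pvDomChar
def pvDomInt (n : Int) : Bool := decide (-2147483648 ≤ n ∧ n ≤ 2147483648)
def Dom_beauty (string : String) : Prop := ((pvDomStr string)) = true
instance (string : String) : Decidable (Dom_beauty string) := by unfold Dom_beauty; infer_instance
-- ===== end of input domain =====

-- B replaces A's second per-character scan (value.index per character) by a weighted sum
-- count*(rank+1) over the 26 sorted letters: a different decomposition, by letter instead of by character.

def asciiLowercase : List Char := "abcdefghijklmnopqrstuvwxyz".toList

-- ===== PORT A =====
def beauty (string : String) : Int :=
  let s := PySem.Str.lower string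
  let quant0 : PySem.Dict Char Int :=
    asciiLowercase.foldl (fun d letter => d.insert letter 0) PySem.Dict.empty
  let quant := s.toList.foldl
    (fun d char => if d.contains char then d.insert char (d.getD char 0 + 1) else d) quant0
  let value := PySem.List.sorted quant.keys (fun i => quant.getD i 0) false
  ((s.toList.filter (fun char => quant.contains char)).map
    (fun char => ((PySem.List.index? value char).getD 0 : Int) + 1)).sum

-- ===== PORT B =====
def beauty_alt (string : String) : Int :=
  let s := PySem.Str.lower string
  let quant : PySem.Dict Char Int :=
    asciiLowercase.foldl
      (fun d letter =>
        d.insert letter (s.toList.foldl (fun n c => if c == letter then n + 1 else n) (0 : Int)))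
      PySem.Dict.empty
  let value := PySem.List.sorted quant.keys (fun i => quant.getD i 0) false
  ((PySem.List.enumerate value).map (fun p => quant.getD p.2 0 * (p.1 + 1))).sum

-- ===== PRECONDITION & SPEC =====
def Spec_beauty (string : String) (out : Int) : Prop := out = beauty_alt string
instance (string : String) (out : Int) : Decidable (Spec_beauty string out) := by unfold Spec_beauty; infer_instance

-- ===== CLAIM (what is proved, stated in full; the proofs are below) =====
def Claim_equal_beauty : Prop := ∀ (string : String), Dom_beauty string → Spec_beauty string (beauty string)

-- ===== LEMMAS AND PROOFS =====

theorem nodup_ascii : asciiLowercase.Nodup := by decide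

-- B's dict comprehension, spelled out
def quantB (t : List Char) : PySem.Dict Char Int :=
  asciiLowercase.foldl
    (fun d letter => d.insert letter (t.foldl (fun n c => if c == letter then n + 1 else n) (0 : Int)))
    PySem.Dict.empty

theorem quantB_items (t : List Char) :
    (quantB t).items = asciiLowercase.map (fun l => (l, (t.count l : Int))) := by
  unfold quantB
  rw [PySem.Dict.items_foldl_insert_fresh asciiLowercase (fun a => a)
      (fun letter => t.foldl (fun n c => if c == letter then n + 1 else n) (0 : Int))
      PySem.Dict.empty (by intro a _; rfl) (by simpa using nodup_ascii)]
  have hemp : (PySem.Dict.empty : PySem.Dict Char Int).items = [] := rfl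
  rw [hemp, List.nil_append]
  apply List.map_congr_left
  intro l _
  rw [PySem.List.foldl_beq_add_one]
  simp

theorem quantB_keys (t : List Char) : (quantB t).keys = asciiLowercase := by
  show ((quantB t).items.map (·.1)) = asciiLowercase
  rw [quantB_items]; simp [Function.comp_def]

theorem quantB_getD (t : List Char) (l : Char) (hl : l ∈ asciiLowercase) :
    (quantB t).getD l 0 = (t.count l : Int) := by
  apply PySem.Dict.getD_of_mem_items
  · rw [quantB_items]; exact List.mem_map.2 ⟨l, hl, rfl⟩
  · rw [quantB_keys]; exact nodup_ascii

-- A's counting loop: keys are preserved and each contained key's value grows by its count.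
theorem countLoop_keys (t : List Char) (d : PySem.Dict Char Int) :
    (t.foldl (fun d char => if d.contains char then d.insert char (d.getD char 0 + 1) else d) d).keys
      = d.keys := by
  induction t generalizing d with
  | nil => rfl
  | cons c t ih =>
      simp only [List.foldl_cons]
      by_cases h : d.contains c = true
      · rw [if_pos h, ih, PySem.Dict.keys_insert_of_contains d _ h]
      · rw [if_neg h, ih]

theorem countLoop_getD (t : List Char) (d : PySem.Dict Char Int) (v : Char) :
    (t.foldl (fun d char => if d.contains char then d.insert char (d.getD char 0 + 1) else d) d).getD v 0
      = d.getD v 0 + (if d.contains v then (t.count v : Int) else 0) := by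
  induction t generalizing d with
  | nil => simp
  | cons c t ih =>
      simp only [List.foldl_cons, List.count_cons]
      by_cases hc : d.contains c = true
      · rw [if_pos hc, ih]
        rw [PySem.Dict.contains_insert]
        by_cases hvc : v = c
        · subst hvc
          simp [PySem.Dict.getD_insert_self, hc]
          ring
        · rw [PySem.Dict.getD_insert_of_ne d _ _ hvc]
          have h1 : (v == c) = false := by simp [hvc]
          have h2 : (c == v) = false := by
            rw [beq_eq_false_iff_ne]; exact fun h => hvc h.symm
          simp [h1, h2]
      · rw [if_neg hc, ih]
        by_cases hvc : v = c
        · subst hvc; simp [hc]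
        · have h2 : (c == v) = false := by
            rw [beq_eq_false_iff_ne]; exact fun h => hvc h.symm
          simp [h2]

-- A's quant0 (all 26 letters mapped to 0)
def quant0A : PySem.Dict Char Int :=
  asciiLowercase.foldl (fun d letter => d.insert letter 0) PySem.Dict.empty

theorem quant0A_items : quant0A.items = asciiLowercase.map (fun l => (l, (0 : Int))) := by
  unfold quant0A
  rw [PySem.Dict.items_foldl_insert_fresh asciiLowercase (fun a => a) (fun _ => (0 : Int))
      PySem.Dict.empty (by intro a _; rfl) (by simpa using nodup_ascii)]
  have hemp : (PySem.Dict.empty : PySem.Dict Char Int).items = [] := rfl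
  rw [hemp, List.nil_append]

theorem quant0A_keys : quant0A.keys = asciiLowercase := by
  show (quant0A.items.map (·.1)) = asciiLowercase
  rw [quant0A_items]; simp [Function.comp_def]

theorem quant0A_getD (l : Char) (hl : l ∈ asciiLowercase) : quant0A.getD l 0 = 0 := by
  apply PySem.Dict.getD_of_mem_items
  · rw [quant0A_items]; exact List.mem_map.2 ⟨l, hl, rfl⟩
  · rw [quant0A_keys]; exact nodup_ascii

-- the two quant dicts are literally equal
theorem quant_eq (t : List Char) :
    t.foldl (fun d char => if d.contains char then d.insert char (d.getD char 0 + 1) else d) quant0A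
      = quantB t := by
  set qA := t.foldl (fun d char => if d.contains char then d.insert char (d.getD char 0 + 1) else d) quant0A with hqA
  have hkeys : qA.keys = asciiLowercase := by rw [hqA, countLoop_keys, quant0A_keys]
  apply PySem.Dict.ext
  rw [PySem.Dict.items_eq_map_keys qA (by rw [hkeys]; exact nodup_ascii) 0, hkeys, quantB_items]
  apply List.map_congr_left
  intro l hl
  rw [hqA, countLoop_getD, quant0A_getD l hl]
  have hcont : quant0A.contains l = true := by
    rw [PySem.Dict.contains_iff_mem_keys, quant0A_keys]; exact hl
  simp [hcont]

-- index-weighted character sum = count-weighted rank sum (the counting swap)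
theorem enum_indicator_sum (c : Char) (value : List Char) (hnd : value.Nodup) : ∀ s0 : Int,
    ((PySem.List.enumerate value s0).map (fun p => (if c = p.2 then (1 : Int) else 0) * (p.1 + 1))).sum
      = if c ∈ value then ((PySem.List.index? value c).getD 0 : Int) + s0 + 1 else 0 := by
  induction value with
  | nil => intro s0; simp [PySem.List.enumerate]
  | cons v rest ih =>
      intro s0
      rw [PySem.List.enumerate_cons]
      simp only [List.map_cons, List.sum_cons]
      rcases List.nodup_cons.1 hnd with ⟨hv, hndr⟩
      rw [ih hndr (s0 + 1)]
      by_cases hcv : c = v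
      · subst hcv
        rw [PySem.List.index?_cons_self]
        simp [hv]
      · rw [PySem.List.index?_cons_of_ne rest (show v ≠ c from fun h => hcv h.symm)]
        by_cases hcr : c ∈ rest
        · rcases Option.isSome_iff_exists.1 ((PySem.List.index?_isSome_iff rest c).2 hcr) with ⟨k, hk⟩
          rw [hk]
          simp [hcv, hcr]
          ring
        · rw [(PySem.List.index?_eq_none_iff rest c).2 hcr]
          simp [hcv, hcr]

theorem counting_swap (t value : List Char) (hnd : value.Nodup) :
    ((t.filter (fun c => decide (c ∈ value))).map
        (fun c => ((PySem.List.index? value c).getD 0 : Int) + 1)).sum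
      = ((PySem.List.enumerate value 0).map (fun p => ((t.count p.2 : Int)) * (p.1 + 1))).sum := by
  induction t with
  | nil => simp
  | cons c t ih =>
      rw [List.filter_cons]
      have hsplit :
          ((PySem.List.enumerate value 0).map
              (fun p => ((List.count p.2 (c :: t) : Int)) * (p.1 + 1))).sum
            = ((PySem.List.enumerate value 0).map
                (fun p => ((List.count p.2 t : Int)) * (p.1 + 1))).sum
              + ((PySem.List.enumerate value 0).map
                  (fun p => (if c = p.2 then (1 : Int) else 0) * (p.1 + 1))).sum := by
        rw [← PySem.List.sum_map_add_int]
        apply congrArg List.sum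
        apply List.map_congr_left
        intro p _
        rw [List.count_cons]
        by_cases h : c = p.2
        · simp [h]; ring
        · have hb : (c == p.2) = false := by simp [h]
          simp [hb, h]
      rw [hsplit, enum_indicator_sum c value hnd 0]
      by_cases hm : c ∈ value
      · simp only [hm, decide_true, if_true, List.map_cons, List.sum_cons]
        rw [ih]; ring
      · simp only [hm, decide_false, Bool.false_eq_true, if_false]
        rw [ih]; simp

set_option maxHeartbeats 1600000 in
theorem beauty_eq_alt (string : String) : beauty string = beauty_alt string := by
  simp only [beauty, beauty_alt]
  set t := (PySem.Str.lower string).toList with ht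
  rw [show (asciiLowercase.foldl (fun d letter => d.insert letter 0) PySem.Dict.empty) = quant0A from rfl]
  rw [show (asciiLowercase.foldl
      (fun d letter => d.insert letter (t.foldl (fun n c => if c == letter then n + 1 else n) (0 : Int)))
      PySem.Dict.empty) = quantB t from rfl]
  rw [quant_eq t]
  set q := quantB t with hq
  set value := PySem.List.sorted q.keys (fun i => q.getD i 0) false with hval
  have hk : q.keys = asciiLowercase := by rw [hq]; exact quantB_keys t
  have hmemval : ∀ c, c ∈ value ↔ c ∈ asciiLowercase := by
    intro c
    rw [hval, PySem.List.mem_sorted, hk]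
  have hperm : value.Perm q.keys := by
    rw [hval]; exact PySem.List.sorted_perm q.keys (fun i => q.getD i 0) false
  have hknd : q.keys.Nodup := by rw [hk]; exact nodup_ascii
  have hndval : value.Nodup := hperm.nodup_iff.2 hknd
  have hfilter : (fun char => q.contains char) = (fun c => decide (c ∈ value)) := by
    funext c
    rw [PySem.Dict.contains_eq_decide_mem_keys, hk]
    by_cases h : c ∈ asciiLowercase
    · simp [h, (hmemval c).2 h]
    · have : c ∉ value := fun hv => h ((hmemval c).1 hv)
      simp [h, this]
  rw [hfilter, counting_swap t value hndval]
  apply congrArg List.sum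
  apply List.map_congr_left
  intro p hp
  rcases (PySem.List.mem_enumerate_iff value 0 p).1 hp with ⟨k, hkk, hpk⟩
  have hp2 : p.2 ∈ value := by rw [hpk]; exact List.getElem_mem hkk
  have hgd := quantB_getD t p.2 ((hmemval p.2).1 hp2)
  rw [← hq] at hgd
  rw [hgd]

-- ===== VERDICT (by name: the statement is the Claim_ definition above) =====
theorem beauty_spec : Claim_equal_beauty := by
  intro s _
  exact beauty_eq_alt s
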